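-- pv_equiv track=rewrite | github.com/PigInTheSky1234/DiffCollAttack | MILP_DiffCollisionAttackCRAFT.py | GetRelationofK
-- ===== SOURCE A (Python) =====
-- def GetRelationofK(Round):
--     PT = [9, 15, 8, 13, 10, 14, 12, 11, 0, 1, 2, 3, 4, 5, 6, 7]
--     AllIndices = [[i for i in range(16)]]
--
--     for r in range(Round - 1):
--         TempIndice = AllIndices[-1]
--         NewIndice = [0] * 16
--         for i in range(16):
--             NewIndice[i] = TempIndice[PT[i]]
--         AllIndices.append(NewIndice)
--     return AllIndices
-- ===== SOURCE B (Python) =====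
-- def GetRelationofK(Round):
--     # Cycle decomposition of PT: round r's array is PT^r, so within a cycle
--     # [c0..c_{L-1}] position c_j at round r holds c_{(j+r) % L}.
--     PT = [9, 15, 8, 13, 10, 14, 12, 11, 0, 1, 2, 3, 4, 5, 6, 7]
--     seen = [False] * 16
--     cycles = []
--     for s in range(16):
--         if not seen[s]:
--             cyc = []
--             j = s
--             while not seen[j]:
--                 seen[j] = True
--                 cyc.append(j)
--                 j = PT[j]
--             cycles.append(cyc)
--     result = []
--     for r in range(max(1, Round)):
--         row = [0] * 16
--         for cyc in cycles:
--             L = len(cyc)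
--             for j in range(L):
--                 row[cyc[j]] = cyc[(j + r) % L]
--         result.append(row)
--     return result
-- ===== Notes on version B (the rewrite author's own statement) =====
-- stated objective: alternative
-- what changed: Replaces A's round-by-round composition (each round built by indexing the previous round through PT) with a cycle decomposition of the permutation: PT's cycles are found once, and round r's array is read off directly as c_{(j+r) mod L} within each cycle, so no round depends on the previous one.
import Mathlib
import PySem

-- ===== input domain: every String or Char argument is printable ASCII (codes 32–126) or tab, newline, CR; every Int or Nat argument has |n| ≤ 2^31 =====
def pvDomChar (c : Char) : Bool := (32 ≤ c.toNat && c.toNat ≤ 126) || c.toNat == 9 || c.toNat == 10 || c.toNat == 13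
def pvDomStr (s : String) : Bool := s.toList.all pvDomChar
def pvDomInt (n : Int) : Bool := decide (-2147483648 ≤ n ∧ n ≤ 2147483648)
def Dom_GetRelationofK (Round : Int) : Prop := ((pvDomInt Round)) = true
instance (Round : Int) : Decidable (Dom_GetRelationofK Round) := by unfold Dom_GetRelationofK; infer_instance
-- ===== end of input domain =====

-- B replaces A's round-by-round composition by a cycle decomposition of PT:
-- round r's array is PT^r, read off per cycle as c_{(j+r) mod L}; objective: alternative.

-- ===== PORT A =====
def pvPT : List Int := [9, 15, 8, 13, 10, 14, 12, 11, 0, 1, 2, 3, 4, 5, 6, 7]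

-- inner loop: NewIndice[i] = TempIndice[PT[i]]; all indices are in range, so pyGetD/pySetD are exact
def pvBuildNew (temp : List Int) : List Int :=
  (PySem.List.pyRange 0 16 1).foldl
    (fun newI i =>
      PySem.List.pySetD newI i (PySem.List.pyGetD temp (PySem.List.pyGetD pvPT i 0) 0))
    (List.replicate 16 0)

def GetRelationofK (Round : Int) : List (List Int) :=
  (PySem.List.pyRange 0 (Round - 1) 1).foldl
    (fun acc _r => acc ++ [pvBuildNew (PySem.List.pyGetD acc (-1) [])])
    [PySem.List.pyRange 0 16 1]

-- ===== PORT B =====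
def pvPTb : List Int := [9, 15, 8, 13, 10, 14, 12, 11, 0, 1, 2, 3, 4, 5, 6, 7]

-- B's inner `while not seen[j]` walk; fuel 16 bounds it (each step marks one of 16 slots seen)
def pvWalk : Nat → Int → List Bool → List Int → List Bool × List Int
  | 0, _, seen, cyc => (seen, cyc)
  | fuel + 1, j, seen, cyc =>
    if PySem.List.pyGetD seen j true then (seen, cyc)
    else pvWalk fuel (PySem.List.pyGetD pvPTb j 0) (PySem.List.pySetD seen j true) (cyc ++ [j])

def pvCycles : List (List Int) :=
  ((PySem.List.pyRange 0 16 1).foldl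
    (fun st s =>
      if PySem.List.pyGetD st.1 s true then st
      else
        let p := pvWalk 16 s st.1 []
        (p.1, st.2 ++ [p.2]))
    (List.replicate 16 false, ([] : List (List Int)))).2

def pvRow (r : Int) : List Int :=
  pvCycles.foldl
    (fun row cyc =>
      (PySem.List.pyRange 0 (cyc.length : Int) 1).foldl
        (fun row j =>
          PySem.List.pySetD row (PySem.List.pyGetD cyc j 0)
            (PySem.List.pyGetD cyc (PySem.Int.mod (j + r) (cyc.length : Int)) 0))
        row)
    (List.replicate 16 0)

def GetRelationofK_alt (Round : Int) : List (List Int) :=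
  (PySem.List.pyRange 0 (max 1 Round) 1).foldl (fun res r => res ++ [pvRow r]) []

-- ===== PRECONDITION & SPEC =====
def Spec_GetRelationofK (Round : Int) (out : List (List Int)) : Prop := out = GetRelationofK_alt Round
instance (Round : Int) (out : List (List Int)) : Decidable (Spec_GetRelationofK Round out) := by unfold Spec_GetRelationofK; infer_instance

-- ===== CLAIM (what is proved, stated in full; the proofs are below) =====
def Claim_equal_GetRelationofK : Prop := ∀ (Round : Int), Dom_GetRelationofK Round → Spec_GetRelationofK Round (GetRelationofK Round)

-- ===== LEMMAS AND PROOFS =====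

set_option maxRecDepth 100000 in
lemma pvRow_period (r : Int) : pvRow (r + 16) = pvRow r := by
  have hc : pvCycles = [[0, 9, 1, 15, 7, 11, 3, 13, 5, 14, 6, 12, 4, 10, 2, 8]] := by decide
  unfold pvRow
  rw [hc]
  have hl : (([0, 9, 1, 15, 7, 11, 3, 13, 5, 14, 6, 12, 4, 10, 2, 8] : List Int).length : Int) = 16 := by decide
  have hr16 : PySem.List.pyRange 0 16 1 = [0,1,2,3,4,5,6,7,8,9,10,11,12,13,14,15] := by decide
  have h : ∀ j : Int, PySem.Int.mod (j + (r + 16)) 16 = PySem.Int.mod (j + r) 16 := by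
    intro j
    have e : j + (r + 16) = (j + r) + 16 := by ring
    rw [e, PySem.Int.mod_eq_emod_of_pos (b := 16) (by norm_num),
        PySem.Int.mod_eq_emod_of_pos (b := 16) (by norm_num)]
    omega
  simp only [hl, hr16, List.foldl_cons, List.foldl_nil, h]

set_option maxRecDepth 100000 in
lemma pv_main (k : Nat) : pvBuildNew^[k] (PySem.List.pyRange 0 16 1) = pvRow (k : Int) := by
  induction k using Nat.strong_induction_on with
  | _ k ih =>
    by_cases h : k < 16
    · interval_cases k <;> decide
    · have h16 : k = (k - 16) + 16 := by omega
      rw [h16, Function.iterate_add_apply]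
      have hb : pvBuildNew^[16] (PySem.List.pyRange 0 16 1) = PySem.List.pyRange 0 16 1 := by decide
      rw [hb, ih (k - 16) (by omega)]
      have hc : ((k - 16 + 16 : Nat) : Int) = ((k - 16 : Nat) : Int) + 16 := by push_cast; ring
      rw [hc, pvRow_period]

lemma pv_foldA (x : List Int) (l : List Int) :
    l.foldl (fun acc _ => acc ++ [pvBuildNew (PySem.List.pyGetD acc (-1) [])]) [x]
      = (List.range (l.length + 1)).map (fun k => pvBuildNew^[k] x) := by
  induction l using List.reverseRecOn with
  | nil => simp
  | append_singleton l a ih =>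
    rw [List.foldl_append, ih]
    simp only [List.foldl_cons, List.foldl_nil, List.length_append, List.length_singleton]
    have hlast : (List.range (l.length + 1)).map (fun k => pvBuildNew^[k] x)
        = (List.range l.length).map (fun k => pvBuildNew^[k] x) ++ [pvBuildNew^[l.length] x] := by
      rw [List.range_succ, List.map_append]; rfl
    rw [hlast, PySem.List.pyGetD_neg_one_append_singleton, ← hlast]
    rw [List.range_succ (n := l.length + 1), List.map_append]
    simp [Function.iterate_succ_apply']

-- ===== VERDICT (by name: the statement is the Claim_ definition above) =====
theorem GetRelationofK_spec : Claim_equal_GetRelationofK := by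
  intro Round _
  unfold Spec_GetRelationofK GetRelationofK GetRelationofK_alt
  rw [pv_foldA, PySem.List.foldl_append_singleton_eq_map]
  rw [PySem.List.pyRange_one 0 (Round - 1), PySem.List.pyRange_one 0 (max 1 Round)]
  simp only [List.length_map, List.length_range, List.map_map]
  have hn : (Round - 1 - 0).toNat + 1 = (max 1 Round - 0).toNat := by omega
  rw [hn]
  apply List.map_congr_left
  intro k _
  simp [Function.comp, pv_main]
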